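-- pv_equiv track=rewrite | github.com/lewetzk/rst_summary | rst-main/create_entity_grid.py | create_entity_grid
-- ===== SOURCE A (Python) =====
-- def create_entity_grid(doc_roles, num_of_sents):
--     """
--     input: doc_roles: list of splitted lines from a .role file
--     """
--     # maps the coreference numbers to the index from the entity matrix
--     coref_to_idx = {}
--     idx = 0
--     for line in doc_roles[1:]:
--         temp_coref = line[-2]
--
--         if temp_coref not in coref_to_idx:
--             coref_to_idx[temp_coref] = idx
--             idx += 1
--
--     num_of_entities = len(coref_to_idx)
--
--     # create matrix with num of sentence rows and num of entities columns
--     entity_matrix = [["-" for i in range(num_of_entities)] for j in range(num_of_sents)]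
--     for line in doc_roles[1:]:
--         coref = line[-2]
--         sent_num = int(line[2]) - 1
--         coref_idx = coref_to_idx[coref]
--
--         if line[0] == "indir-obj":
--             entity_matrix[sent_num][coref_idx] = "x"
--         elif line[0] == "dir-obj":
--             entity_matrix[sent_num][coref_idx] = "o"
--         elif line[0] == "sbj":
--             entity_matrix[sent_num][coref_idx] = "s"
--
--     return entity_matrix
-- ===== SOURCE B (Python) =====
-- def create_entity_grid(doc_roles, num_of_sents):
--     """Column-major construction: for each entity (coref, in first-appearance
--     order) build its full column over the sentences, then transpose the list of
--     columns into the row-major grid."""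
--     lines = doc_roles[1:]
--     symbol = {"indir-obj": "x", "dir-obj": "o", "sbj": "s"}
--     columns = []
--     for coref in dict.fromkeys(line[-2] for line in lines):
--         col = ["-"] * num_of_sents
--         for line in lines:
--             if line[-2] == coref and line[0] in symbol:
--                 col[int(line[2]) - 1] = symbol[line[0]]
--         columns.append(col)
--     return [[col[r] for col in columns] for r in range(num_of_sents)]
-- ===== Notes on version B (the rewrite author's own statement) =====
-- stated objective: alternative
-- what changed: B builds the grid column-major: for each coreference in first-appearance order it constructs that entity's whole column over the sentences (scanning the role lines once per entity), then transposes the column list into the row-major matrix, instead of A's row-major matrix mutated cell-by-cell under a dict of column indices.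
import Mathlib
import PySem

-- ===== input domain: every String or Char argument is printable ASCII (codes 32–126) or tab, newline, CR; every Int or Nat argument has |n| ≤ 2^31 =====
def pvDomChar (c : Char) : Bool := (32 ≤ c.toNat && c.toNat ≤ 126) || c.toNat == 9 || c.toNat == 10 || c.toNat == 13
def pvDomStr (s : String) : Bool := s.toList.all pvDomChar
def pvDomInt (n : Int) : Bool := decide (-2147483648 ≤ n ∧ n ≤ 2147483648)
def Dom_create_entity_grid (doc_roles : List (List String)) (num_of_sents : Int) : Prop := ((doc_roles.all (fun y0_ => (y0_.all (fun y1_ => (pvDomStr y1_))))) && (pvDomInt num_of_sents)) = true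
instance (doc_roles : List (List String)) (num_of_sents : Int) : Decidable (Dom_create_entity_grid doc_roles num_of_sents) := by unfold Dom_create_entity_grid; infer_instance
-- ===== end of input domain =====

-- B builds the grid column-major (one full column per entity in first-appearance
-- order, then a transpose) instead of A's cell-by-cell mutation of a row-major
-- matrix under a coref->index dict (objective: alternative, same cost).


-- shared field accessors (the literal line[-2], line[0], int(line[2]) - 1 of both Pythons)
def keyOf (line : List String) : String := (PySem.List.pyGet? line (-2)).getD ""
def roleOf (line : List String) : String := (PySem.List.pyGet? line 0).getD ""
def sentOf (line : List String) : Int := ((PySem.Int.ofStr? ((PySem.List.pyGet? line 2).getD "")).getD 0) - 1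

-- ===== PORT A =====
-- Python's 'm[r][c] = v' on a list of lists (exact where the indices are in range — Pre_; no-op where Python raises)
def pySetCell (m : List (List String)) (r c : Int) (v : String) : List (List String) :=
  match PySem.List.pyGet? m r with
  | some row => PySem.List.pySetD m r (PySem.List.pySetD row c v)
  | none => m

-- first loop: build coref_to_idx
def egA_collect : List (List String) → PySem.Dict String Int → Int → PySem.Dict String Int
  | [], d, _ => d
  | line :: rest, d, idx =>
    if d.contains (keyOf line) = false then
      egA_collect rest (d.insert (keyOf line) idx) (idx + 1)
    else
      egA_collect rest d idx

-- second loop: write symbols into the matrix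
def egA_fill (c2i : PySem.Dict String Int) : List (List String) → List (List String) → List (List String)
  | [], m => m
  | line :: rest, m =>
    let coref_idx := (c2i.get? (keyOf line)).getD 0
    let m' :=
      if roleOf line = "indir-obj" then pySetCell m (sentOf line) coref_idx "x"
      else if roleOf line = "dir-obj" then pySetCell m (sentOf line) coref_idx "o"
      else if roleOf line = "sbj" then pySetCell m (sentOf line) coref_idx "s"
      else m
    egA_fill c2i rest m'

def create_entity_grid (doc_roles : List (List String)) (num_of_sents : Int) : List (List String) :=
  let rest := PySem.List.slice doc_roles (some 1) none
  let coref_to_idx := egA_collect rest PySem.Dict.empty 0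
  let num_of_entities : Int := coref_to_idx.size
  let entity_matrix := (PySem.List.pyRange 0 num_of_sents 1).map
    (fun _ => (PySem.List.pyRange 0 num_of_entities 1).map (fun _ => "-"))
  egA_fill coref_to_idx rest entity_matrix

-- ===== PORT B =====
def egB_sym : PySem.Dict String String :=
  PySem.Dict.ofList [("indir-obj", "x"), ("dir-obj", "o"), ("sbj", "s")]

-- inner loop: one entity's full column over the sentences
def egB_col (lines : List (List String)) (num_of_sents : Int) (coref : String) : List String :=
  lines.foldl (fun col line =>
      if keyOf line = coref ∧ egB_sym.contains (roleOf line) = true then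
        PySem.List.pySetD col (sentOf line) (egB_sym.getD (roleOf line) "")
      else col)
    (PySem.List.pyRepeat ["-"] num_of_sents)

def create_entity_grid_alt (doc_roles : List (List String)) (num_of_sents : Int) : List (List String) :=
  let lines := PySem.List.slice doc_roles (some 1) none
  let columns := (PySem.List.dedup (lines.map keyOf)).map (egB_col lines num_of_sents)
  (PySem.List.pyRange 0 num_of_sents 1).map
    (fun r => columns.map (fun col => PySem.List.pyGetD col r ""))

-- ===== PRECONDITION & SPEC =====
-- Pre_ excludes exactly the inputs where the Python A raises: a data line shorter than 3
-- fields (IndexError), an unparseable sentence-number field (ValueError), or a role line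
-- whose sentence index falls outside the matrix rows (IndexError).
def Pre_create_entity_grid (doc_roles : List (List String)) (num_of_sents : Int) : Prop :=
  ((doc_roles.drop 1).all (fun line =>
    decide (3 ≤ line.length) &&
    (match PySem.Int.ofStr? (line.getD 2 "") with
     | none => false
     | some k =>
       if line.getD 0 "" = "indir-obj" ∨ line.getD 0 "" = "dir-obj" ∨ line.getD 0 "" = "sbj"
       then decide (-num_of_sents ≤ k - 1 ∧ k - 1 < num_of_sents)
       else true))) = true
instance (doc_roles : List (List String)) (num_of_sents : Int) : Decidable (Pre_create_entity_grid doc_roles num_of_sents) := by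
  unfold Pre_create_entity_grid; infer_instance

def pvWitness_create_entity_grid : List (List String) × Int :=
  ([["role", "tok", "sent", "coref", "f"], ["sbj", "dog", "1", "c1", "f"], ["dir-obj", "cat", "2", "c2", "f"]], 2)

def Spec_create_entity_grid (doc_roles : List (List String)) (num_of_sents : Int) (out : List (List String)) : Prop := out = create_entity_grid_alt doc_roles num_of_sents
instance (doc_roles : List (List String)) (num_of_sents : Int) (out : List (List String)) : Decidable (Spec_create_entity_grid doc_roles num_of_sents out) := by unfold Spec_create_entity_grid; infer_instance

-- ===== CLAIM (what is proved, stated in full; the proofs are below) =====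
def Claim_equal_create_entity_grid : Prop := ∀ (doc_roles : List (List String)) (num_of_sents : Int), Dom_create_entity_grid doc_roles num_of_sents → Pre_create_entity_grid doc_roles num_of_sents → Spec_create_entity_grid doc_roles num_of_sents (create_entity_grid doc_roles num_of_sents)

-- ===== LEMMAS AND PROOFS =====

-- the symbol the role of a line would write, if any (A's if-chain = B's dict)
def symOf? (line : List String) : Option String :=
  if roleOf line = "indir-obj" then some "x"
  else if roleOf line = "dir-obj" then some "o"
  else if roleOf line = "sbj" then some "s" else none

theorem pySetD_eq_match {α : Type} (xs : List α) (i : Int) (v : α) :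
    PySem.List.pySetD xs i v =
      match PySem.List.pyIdx? xs.length i with
      | some k => xs.set k v
      | none => xs := by
  cases h : PySem.List.pyIdx? xs.length i <;>
    simp [PySem.List.pySetD, PySem.List.pySet?, h]

theorem pyIdx?_lt (n : Nat) (i : Int) (k : Nat) (h : PySem.List.pyIdx? n i = some k) : k < n := by
  unfold PySem.List.pyIdx? at h
  split_ifs at h <;> simp_all <;> omega

theorem pySetCell_length (m : List (List String)) (r c : Int) (v : String) :
    (pySetCell m r c v).length = m.length := by
  unfold pySetCell
  cases h : PySem.List.pyGet? m r <;> simp [PySem.List.length_pySetD]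

theorem pySetCell_row (m : List (List String)) (r c : Int) (v : String) (row : List String)
    (h : row ∈ pySetCell m r c v) : row ∈ m ∨ ∃ row' ∈ m, row.length = row'.length := by
  unfold pySetCell at h
  cases hg : PySem.List.pyGet? m r with
  | none => simp only [hg] at h; exact Or.inl h
  | some row0 =>
    simp only [hg] at h
    rw [pySetD_eq_match m r _] at h
    cases hk : PySem.List.pyIdx? m.length r with
    | none => simp only [hk] at h; exact Or.inl h
    | some k =>
      simp only [hk] at h
      rcases List.mem_or_eq_of_mem_set h with h' | h'
      · exact Or.inl h'
      · refine Or.inr ⟨row0, (PySem.List.mem_of_pyGet?_eq_some _ hg), ?_⟩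
        rw [h', PySem.List.length_pySetD]

theorem egA_fill_length (c2i : PySem.Dict String Int) (lines : List (List String))
    (m : List (List String)) : (egA_fill c2i lines m).length = m.length := by
  induction lines generalizing m with
  | nil => simp [egA_fill]
  | cons line rest ih =>
    simp only [egA_fill]
    rw [ih]
    split_ifs <;> simp [pySetCell_length]

theorem egA_fill_rowlen (c2i : PySem.Dict String Int) (lines : List (List String))
    (m : List (List String)) (E : Nat) (h : ∀ row ∈ m, row.length = E) :
    ∀ row ∈ egA_fill c2i lines m, row.length = E := by
  induction lines generalizing m with
  | nil => simpa [egA_fill] using h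
  | cons line rest ih =>
    simp only [egA_fill]
    apply ih
    intro row hrow
    have step : ∀ (r c : Int) (v : String), row ∈ pySetCell m r c v → row.length = E := by
      intro r c v hmem
      rcases pySetCell_row m r c v row hmem with h' | ⟨row', hr', he⟩
      · exact h row h'
      · rw [he]; exact h row' hr'
    split_ifs at hrow with h1 h2 h3
    · exact step _ _ _ hrow
    · exact step _ _ _ hrow
    · exact step _ _ _ hrow
    · exact h row hrow

theorem pySetCell_cell (m : List (List String)) (E r c : Nat)
    (hrows : ∀ row ∈ m, row.length = E) (hr : r < m.length) (hc : c < E) (i : Int) (j : Nat)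
    (hj : j < E) (v : String) :
    ((pySetCell m i (j : Int) v).getD r []).getD c "" =
      if PySem.List.pyIdx? m.length i = some r ∧ (j : Int) = (c : Int) then v
      else ((m.getD r []).getD c "") := by
  have hrowlen : m[r].length = E := hrows _ (List.getElem_mem hr)
  unfold pySetCell
  cases hk : PySem.List.pyIdx? m.length i with
  | none =>
    have hg : PySem.List.pyGet? m i = none := by
      simp [PySem.List.pyGet?, hk]
    simp [hg, hk]
  | some k =>
    have hklt : k < m.length := pyIdx?_lt _ _ _ hk
    have hg : PySem.List.pyGet? m i = some m[k] := by
      simp [PySem.List.pyGet?, hk, List.getElem?_eq_getElem hklt]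
    rw [hg]
    simp only
    rw [pySetD_eq_match m i _, hk, PySem.List.pySetD_natCast]
    by_cases hrk : r = k
    · subst hrk
      have h1 : (m.set r (m[r].set j v)).getD r [] = m[r].set j v := by
        simp [List.getD, List.getElem?_set_self hr]
      rw [h1]
      by_cases hcj : c = j
      · subst hcj
        have hcl : c < m[r].length := by omega
        simp [List.getD, List.getElem?_set_self hcl, hk, List.getElem?_eq_getElem hr]
      · have h2 : (m[r].set j v)[c]? = m[r][c]? := List.getElem?_set_ne (by omega)
        have hji : ¬ ((j : Int) = (c : Int)) := by exact_mod_cast fun h => hcj (by exact_mod_cast h.symm)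
        simp [List.getD, h2, hji, List.getElem?_eq_getElem hr]
    · have h3 : (m.set k (m[k].set j v))[r]? = m[r]? := List.getElem?_set_ne (by omega)
      have hne : ¬ (some k = some r) := by simpa using fun h => hrk h.symm
      simp [List.getD, h3, hne]

theorem egA_fill_cell (c2i : PySem.Dict String Int) (E r c : Nat) (hc : c < E) :
    ∀ (lines : List (List String)) (m : List (List String)),
      (∀ row ∈ m, row.length = E) → r < m.length →
      (∀ line ∈ lines, ∃ j : Nat, c2i.get? (keyOf line) = some (j : Int) ∧ j < E) →
      ((egA_fill c2i lines m).getD r []).getD c "" =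
        lines.foldl (fun v line =>
          match symOf? line with
          | some s =>
            if PySem.List.pyIdx? m.length (sentOf line) = some r ∧
                (c2i.get? (keyOf line)).getD 0 = (c : Int) then s else v
          | none => v) ((m.getD r []).getD c "") := by
  intro lines
  induction lines with
  | nil => intro m _ _ _; simp [egA_fill]
  | cons line rest ih =>
    intro m hrows hr hd
    obtain ⟨j, hj, hjE⟩ := hd line (by simp)
    simp only [egA_fill, List.foldl_cons]
    have hgetD : (c2i.get? (keyOf line)).getD 0 = (j : Int) := by rw [hj]; rfl
    cases hs : symOf? line with
    | none =>
      have h1 : ¬ roleOf line = "indir-obj" := by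
        intro h; unfold symOf? at hs; simp [h] at hs
      have h2 : ¬ roleOf line = "dir-obj" := by
        intro h; unfold symOf? at hs; simp [h] at hs
      have h3 : ¬ roleOf line = "sbj" := by
        intro h; unfold symOf? at hs; simp [h1, h2, h] at hs
      simp only [h1, h2, h3, if_false]
      exact ih m hrows hr (fun l hl => hd l (by simp [hl]))
    | some s =>
      -- the matched branch writes pySetCell m (sentOf line) (j:Int) s
      have key : ∀ (m' : List (List String)), m' = pySetCell m (sentOf line) (j : Int) s →
          ((egA_fill c2i rest m').getD r []).getD c "" =
            rest.foldl (fun v line =>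
              match symOf? line with
              | some s =>
                if PySem.List.pyIdx? m.length (sentOf line) = some r ∧
                    (c2i.get? (keyOf line)).getD 0 = (c : Int) then s else v
              | none => v)
              (if PySem.List.pyIdx? m.length (sentOf line) = some r ∧
                  (c2i.get? (keyOf line)).getD 0 = (c : Int) then s
               else ((m.getD r []).getD c "")) := by
        intro m' hm'
        have hlen : m'.length = m.length := by rw [hm']; exact pySetCell_length _ _ _ _
        have hrows' : ∀ row ∈ m', row.length = E := by
          intro row hrow
          rcases pySetCell_row m _ _ _ row (hm' ▸ hrow) with h' | ⟨row', hr', he⟩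
          · exact hrows row h'
          · rw [he]; exact hrows row' hr'
        have hcell : (m'.getD r []).getD c "" =
            if PySem.List.pyIdx? m.length (sentOf line) = some r ∧
                (c2i.get? (keyOf line)).getD 0 = (c : Int) then s
            else ((m.getD r []).getD c "") := by
          rw [hm', pySetCell_cell m E r c hrows hr hc _ j hjE, hgetD]
        rw [ih m' hrows' (hlen ▸ hr) (fun l hl => hd l (by simp [hl])), hlen, hcell]
      simp only [hs]
      unfold symOf? at hs
      by_cases h1 : roleOf line = "indir-obj"
      · rw [if_pos h1] at hs; injection hs with hs; subst hs
        rw [if_pos h1]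
        exact key _ (by rw [hgetD])
      by_cases h2 : roleOf line = "dir-obj"
      · rw [if_neg h1, if_pos h2] at hs; injection hs with hs; subst hs
        rw [if_neg h1, if_pos h2]
        exact key _ (by rw [hgetD])
      by_cases h3 : roleOf line = "sbj"
      · rw [if_neg h1, if_neg h2, if_pos h3] at hs; injection hs with hs; subst hs
        rw [if_neg h1, if_neg h2, if_pos h3]
        exact key _ (by rw [hgetD])
      · rw [if_neg h1, if_neg h2, if_neg h3] at hs; exact absurd hs (by simp)

theorem egB_sym_eq_symOf? (line : List String) :
    (if egB_sym.contains (roleOf line) = true then some (egB_sym.getD (roleOf line) "") else none)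
      = symOf? line := by
  unfold symOf?
  by_cases h1 : roleOf line = "indir-obj"
  · rw [h1]; decide
  by_cases h2 : roleOf line = "dir-obj"
  · rw [h2]; simp [h1]; decide
  by_cases h3 : roleOf line = "sbj"
  · rw [h3]; simp [h1, h2]; decide
  · simp only [h1, h2, h3, if_false]
    have : egB_sym.contains (roleOf line) = false := by
      simp [egB_sym, PySem.Dict.ofList, PySem.Dict.update, PySem.Dict.contains_insert, h1, h2, h3]
    simp [this]

theorem pySetD_cell (col : List String) (i : Int) (v : String) (r : Nat) :
    (PySem.List.pySetD col i v).getD r "" =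
      if PySem.List.pyIdx? col.length i = some r then v else col.getD r "" := by
  rw [pySetD_eq_match col i v]
  cases hk : PySem.List.pyIdx? col.length i with
  | none => simp
  | some k =>
    by_cases hkr : k = r
    · subst hkr
      have := pyIdx?_lt _ _ _ hk
      simp [List.getD, List.getElem?_set_self this]
    · have h2 : (col.set k v)[r]? = col[r]? := List.getElem?_set_ne hkr
      simp [List.getD, h2, hkr]

theorem egB_col_cell (lines : List (List String)) (n : Int) (coref : String) (r : Nat) :
    (egB_col lines n coref).getD r "" =
      lines.foldl (fun v line =>
        match symOf? line with
        | some s =>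
          if PySem.List.pyIdx? n.toNat (sentOf line) = some r ∧ keyOf line = coref
          then s else v
        | none => v) ((PySem.List.pyRepeat ["-"] n).getD r "") := by
  unfold egB_col
  have hlen0 : (PySem.List.pyRepeat ["-"] n).length = n.toNat := by
    rw [PySem.List.pyRepeat_singleton]; simp
  rw [← hlen0]
  generalize (PySem.List.pyRepeat ["-"] n) = col
  induction lines generalizing col with
  | nil => simp
  | cons line rest ih =>
    simp only [List.foldl_cons]
    cases hs : symOf? line with
    | none =>
      have hcf : egB_sym.contains (roleOf line) = false := by
        have := egB_sym_eq_symOf? line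
        rw [hs] at this
        by_contra hT
        simp only [Bool.not_eq_false] at hT
        rw [if_pos hT] at this; simp at this
      simp only [hs, hcf]
      have : (keyOf line = coref ∧ false = true) = False := by simp
      rw [if_neg (by simp [hcf])]
      exact ih col
    | some s =>
      have hct : egB_sym.contains (roleOf line) = true := by
        have := egB_sym_eq_symOf? line
        rw [hs] at this
        by_contra hT
        simp only [Bool.not_eq_true] at hT
        rw [if_neg (by simp [hT])] at this; simp at this
      have hval : egB_sym.getD (roleOf line) "" = s := by
        have := egB_sym_eq_symOf? line
        rw [hs, if_pos hct] at this
        injection this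
      simp only [hs]
      by_cases hk : keyOf line = coref
      · rw [if_pos ⟨hk, hct⟩]
        rw [ih (PySem.List.pySetD col (sentOf line) (egB_sym.getD (roleOf line) ""))]
        rw [PySem.List.length_pySetD]
        rw [pySetD_cell, hval]
        by_cases hidx : PySem.List.pyIdx? col.length (sentOf line) = some r
        · rw [if_pos hidx, if_pos ⟨hidx, hk⟩]
        · rw [if_neg hidx, if_neg (by intro ⟨h', _⟩; exact hidx h')]
      · rw [if_neg (by intro ⟨h', _⟩; exact hk h')]
        rw [if_neg (by intro ⟨_, h'⟩; exact hk h')]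
        exact ih col

theorem idxOf?_append_mem (l : List String) (x y : String) (h : y ∈ l) :
    (l ++ [x]).idxOf? y = l.idxOf? y := by
  unfold List.idxOf?
  rw [List.findIdx?_append]
  have : l.findIdx? (fun a => a == y) ≠ none := by
    intro hn
    rw [List.findIdx?_eq_none_iff] at hn
    have := hn y h
    simp at this
  cases hf : l.findIdx? (fun a => a == y) with
  | none => exact absurd hf this
  | some k => rfl

theorem idxOf?_append_self (l : List String) (x : String) (h : x ∉ l) :
    (l ++ [x]).idxOf? x = some l.length := by
  unfold List.idxOf?
  rw [List.findIdx?_append]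
  have : l.findIdx? (fun a => a == x) = none := by
    rw [List.findIdx?_eq_none_iff]
    intro a ha
    show (a == x) = false
    exact beq_eq_false_iff_ne.mpr (fun he => h (he ▸ ha))
  rw [this]
  have h5 : List.findIdx? (fun a => a == x) [x] = some 0 := by
    rw [List.findIdx?_cons]
    rw [if_pos (by simp)]
  rw [h5]
  simp

theorem idxOf?_append_none (l : List String) (x y : String) (h : y ∉ l) (h2 : y ≠ x) :
    (l ++ [x]).idxOf? y = none := by
  unfold List.idxOf?
  rw [List.findIdx?_append]
  have h3 : l.findIdx? (fun a => a == y) = none := by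
    rw [List.findIdx?_eq_none_iff]; intro a ha
    show (a == y) = false
    exact beq_eq_false_iff_ne.mpr (fun he => h (he ▸ ha))
  rw [h3]
  have h4 : List.findIdx? (fun a => a == y) [x] = none := by
    rw [List.findIdx?_cons]
    rw [if_neg (by simp [Ne.symm h2])]
    rfl
  rw [h4]
  rfl

theorem dict_keys_length (d : PySem.Dict String Int) : d.keys.length = d.size := by
  simp [PySem.Dict.keys, PySem.Dict.size]

theorem egA_collect_keys (lines : List (List String)) :
    ∀ (d : PySem.Dict String Int) (idx : Int),
      (egA_collect lines d idx).keys = PySem.Set.update d.keys (lines.map keyOf) := by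
  induction lines with
  | nil => intro d idx; simp [egA_collect, PySem.Set.update_nil]
  | cons line rest ih =>
    intro d idx
    simp only [egA_collect, List.map_cons]
    rw [PySem.Set.update_cons]
    by_cases hc : d.contains (keyOf line) = false
    · rw [if_pos hc, ih]
      congr 1
      rw [PySem.Dict.keys_insert_of_not_contains _ _ hc]
      rw [PySem.Set.add_of_not_mem]
      intro hmem
      rw [← PySem.Dict.contains_iff_mem_keys] at hmem
      rw [hc] at hmem; exact Bool.noConfusion hmem
    · rw [if_neg hc, ih]
      congr 1
      rw [PySem.Set.add_of_mem]
      rw [← PySem.Dict.contains_iff_mem_keys]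
      simpa using hc

theorem egA_collect_get? (lines : List (List String)) :
    ∀ (d : PySem.Dict String Int),
      (∀ k, d.get? k = (d.keys.idxOf? k).map (fun j => (j : Int))) → d.keys.Nodup →
      ∀ k, (egA_collect lines d (d.size : Int)).get? k =
        ((PySem.Set.update d.keys (lines.map keyOf)).idxOf? k).map (fun j => (j : Int)) := by
  induction lines with
  | nil => intro d h _ k; simpa [egA_collect, PySem.Set.update_nil] using h k
  | cons line rest ih =>
    intro d h hnd k
    simp only [egA_collect, List.map_cons]
    rw [PySem.Set.update_cons]
    by_cases hc : d.contains (keyOf line) = false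
    · rw [if_pos hc]
      have hnm : keyOf line ∉ d.keys := by
        intro hmem
        rw [← PySem.Dict.contains_iff_mem_keys] at hmem
        rw [hc] at hmem; exact Bool.noConfusion hmem
      have hkeys' : (d.insert (keyOf line) (d.size : Int)).keys = d.keys ++ [keyOf line] :=
        PySem.Dict.keys_insert_of_not_contains _ _ hc
      have hsize' : ((d.insert (keyOf line) (d.size : Int)).size : Int) = (d.size : Int) + 1 := by
        rw [PySem.Dict.size_insert]
        simp [hc]
      have h' : ∀ k', (d.insert (keyOf line) (d.size : Int)).get? k' =
          ((d.insert (keyOf line) (d.size : Int)).keys.idxOf? k').map (fun j => (j : Int)) := by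
        intro k'
        rw [PySem.Dict.get?_insert, hkeys']
        by_cases hk' : k' = keyOf line
        · subst hk'
          rw [if_pos rfl, idxOf?_append_self _ _ hnm, dict_keys_length]
          rfl
        · rw [if_neg hk', h k']
          by_cases hmem : k' ∈ d.keys
          · rw [idxOf?_append_mem _ _ _ hmem]
          · rw [idxOf?_append_none _ _ _ hmem hk']
            rw [List.idxOf?_eq_none_iff.mpr hmem]
      have hnd' : (d.insert (keyOf line) (d.size : Int)).keys.Nodup := by
        rw [hkeys']
        rw [List.nodup_append]
        exact ⟨hnd, List.nodup_singleton _, fun a ha b hb => by simp at hb; exact fun he => hnm ((he ▸ hb ▸ rfl : a = keyOf line) ▸ ha)⟩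
      have := ih (d.insert (keyOf line) (d.size : Int)) h' hnd' k
      rw [hsize'] at this
      rw [this, hkeys']
      congr 1
      rw [PySem.Set.add_of_not_mem hnm]
    · rw [if_neg hc]
      have hmem : keyOf line ∈ d.keys := by
        rw [← PySem.Dict.contains_iff_mem_keys]
        simpa using hc
      rw [ih d h hnd k, PySem.Set.add_of_mem hmem]

theorem idxOf?_spec (l : List String) (y : String) (j : Nat) (h : l.idxOf? y = some j) :
    j < l.length ∧ l[j]? = some y := by
  rw [List.idxOf?_eq_some_iff] at h
  obtain ⟨hl, he, _⟩ := h
  exact ⟨hl, by rw [List.getElem?_eq_getElem hl, he]⟩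

theorem mem_idxOf? (l : List String) (y : String) (h : y ∈ l) : ∃ j, l.idxOf? y = some j := by
  cases hj : l.idxOf? y with
  | none => exact absurd (List.idxOf?_eq_none_iff.mp hj) (by simpa using h)
  | some j => exact ⟨j, rfl⟩

theorem main_eq (lines : List (List String)) (n : Int) :
    egA_fill (egA_collect lines PySem.Dict.empty 0) lines
      ((PySem.List.pyRange 0 n 1).map
        (fun _ => (PySem.List.pyRange 0 ((egA_collect lines PySem.Dict.empty 0).size : Int) 1).map (fun _ => "-")))
    = (PySem.List.pyRange 0 n 1).map
        (fun r => ((PySem.List.dedup (lines.map keyOf)).map (egB_col lines n)).map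
          (fun col => PySem.List.pyGetD col r "")) := by
  rw [PySem.List.dedup_eq_ofList]
  set order := PySem.Set.ofList (lines.map keyOf) with horder
  set c2i := egA_collect lines PySem.Dict.empty 0 with hc2i
  set E := c2i.size with hEdef
  have hzero : ((PySem.Dict.empty : PySem.Dict String Int).size : Int) = 0 := by
    simp [PySem.Dict.size_empty]
  have hget : ∀ k, c2i.get? k = (order.idxOf? k).map (fun j => (j : Int)) := by
    intro k
    have h0 : ∀ k, (PySem.Dict.empty : PySem.Dict String Int).get? k =
        (((PySem.Dict.empty : PySem.Dict String Int)).keys.idxOf? k).map (fun j => (j : Int)) := by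
      intro k; simp [PySem.Dict.get?_empty, PySem.Dict.keys_empty]
    have := egA_collect_get? lines PySem.Dict.empty h0 (by simp [PySem.Dict.keys_empty]) k
    rw [hzero] at this
    rw [hc2i, this, PySem.Dict.keys_empty, PySem.Set.update_nil_left]
  have hkeys : c2i.keys = order := by
    rw [hc2i, egA_collect_keys, PySem.Dict.keys_empty, PySem.Set.update_nil_left]
  have hE : E = order.length := by
    rw [hEdef, ← dict_keys_length, hkeys]
  have hnd : order.Nodup := PySem.Set.nodup_ofList _
  have hmemkey : ∀ line ∈ lines, keyOf line ∈ order := by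
    intro line hl
    rw [horder]
    exact (PySem.Set.mem_ofList _ _).mpr (List.mem_map_of_mem hl)
  have hranges : ∀ (m : Int), (PySem.List.pyRange 0 m 1).length = m.toNat := by
    intro m; rw [PySem.List.pyRange_one]; simp
  have hrangev : ∀ (m : Int) (r : Nat) (hr : r < (PySem.List.pyRange 0 m 1).length),
      (PySem.List.pyRange 0 m 1)[r] = (r : Int) := by
    intro m r hr
    have h' : (PySem.List.pyRange 0 m 1)[r]? = some (r : Int) := by
      have hrm : r < (m - 0).toNat := by
        rw [PySem.List.pyRange_one] at hr; simpa using hr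
      rw [PySem.List.pyRange_one, List.getElem?_map, List.getElem?_range hrm]
      simp
    rw [List.getElem?_eq_getElem hr] at h'
    exact Option.some.inj h'
  have hd : ∀ line ∈ lines, ∃ j : Nat, c2i.get? (keyOf line) = some (j : Int) ∧ j < E := by
    intro line hl
    obtain ⟨j, hj⟩ := mem_idxOf? order (keyOf line) (hmemkey line hl)
    refine ⟨j, ?_, ?_⟩
    · rw [hget, hj]; rfl
    · rw [hE]; exact (idxOf?_spec _ _ _ hj).1
  have hM0rows : ∀ row ∈ (PySem.List.pyRange 0 n 1).map
      (fun _ => (PySem.List.pyRange 0 (E : Int) 1).map (fun _ => "-")), row.length = E := by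
    intro row hrow
    rw [List.mem_map] at hrow
    obtain ⟨_, _, rfl⟩ := hrow
    rw [List.length_map, hranges]
    simp
  apply List.ext_getElem
  · rw [egA_fill_length, List.length_map, List.length_map]
  · intro r h1 h2
    have hrlen : r < (PySem.List.pyRange 0 n 1).length := by
      rw [egA_fill_length, List.length_map] at h1
      exact h1
    have hrn : r < n.toNat := by rw [← hranges n]; exact hrlen
    rw [List.getElem_map]
    rw [hrangev n r hrlen]
    -- row-level extensionality
    have hrowm : (egA_fill c2i lines ((PySem.List.pyRange 0 n 1).map
        (fun _ => (PySem.List.pyRange 0 (E : Int) 1).map (fun _ => "-"))))[r]'h1 ∈ _ :=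
      List.getElem_mem h1
    apply List.ext_getElem
    · rw [egA_fill_rowlen c2i lines _ E hM0rows _ hrowm, List.length_map, List.length_map, ← hE]
    · intro c hcl hcr
      have hcE : c < E := by
        rwa [egA_fill_rowlen c2i lines _ E hM0rows _ hrowm] at hcl
      -- LHS to getD form and fill-cell
      have hLrow : (egA_fill c2i lines ((PySem.List.pyRange 0 n 1).map
          (fun _ => (PySem.List.pyRange 0 (E : Int) 1).map (fun _ => "-"))))[r]'h1 =
          (egA_fill c2i lines ((PySem.List.pyRange 0 n 1).map
          (fun _ => (PySem.List.pyRange 0 (E : Int) 1).map (fun _ => "-")))).getD r [] := by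
        rw [List.getD_eq_getElem _ _ h1]
      have hclen : c < order.length := by rwa [← hE]
      have hMlen : r < ((PySem.List.pyRange 0 n 1).map
          (fun _ => (PySem.List.pyRange 0 (E : Int) 1).map (fun _ => "-"))).length := by
        rw [List.length_map]; exact hrlen
      have e1 : ((egA_fill c2i lines ((PySem.List.pyRange 0 n 1).map
          (fun _ => (PySem.List.pyRange 0 (E : Int) 1).map (fun _ => "-")))).getD r []).getD c "" =
          ((egA_fill c2i lines ((PySem.List.pyRange 0 n 1).map
          (fun _ => (PySem.List.pyRange 0 (E : Int) 1).map (fun _ => "-"))))[r]'h1)[c]'hcl := by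
        rw [List.getD_eq_getElem _ _ h1]
        exact List.getD_eq_getElem _ _ hcl
      rw [← e1]
      rw [List.getElem_map, List.getElem_map]
      rw [PySem.List.pyGetD_natCast]
      rw [egA_fill_cell c2i E r c hcE lines _ hM0rows hMlen hd]
      rw [egB_col_cell]
      -- initial values are both "-"
      have hinitA : ((((PySem.List.pyRange 0 n 1).map
          (fun _ => (PySem.List.pyRange 0 (E : Int) 1).map (fun _ => "-"))).getD r []).getD c "") = "-" := by
        rw [List.getD_eq_getElem _ _ hMlen, List.getElem_map]
        have hcE' : c < ((PySem.List.pyRange 0 (E : Int) 1).map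
            (fun _ : Int => ("-" : String))).length := by
          rw [List.length_map, hranges]; simpa using hcE
        rw [List.getD_eq_getElem _ _ hcE', List.getElem_map]
      have hinitB : (PySem.List.pyRepeat ["-"] n).getD r "" = "-" := by
        rw [PySem.List.pyRepeat_singleton]
        exact List.getD_replicate _ (by simpa using hrn)
      rw [hinitA, hinitB]
      have hMlen2 : ((PySem.List.pyRange 0 n 1).map
          (fun _ => (PySem.List.pyRange 0 (E : Int) 1).map (fun _ => "-"))).length = n.toNat := by
        rw [List.length_map]; exact hranges n
      rw [hMlen2]
      apply PySem.List.foldl_congr_mem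
      intro acc line hl
      cases hs : symOf? line with
      | none => simp only [hs]
      | some s =>
        simp only [hs]
        obtain ⟨j, hj⟩ := mem_idxOf? order (keyOf line) (hmemkey line hl)
        obtain ⟨hjlen, hjget⟩ := idxOf?_spec _ _ _ hj
        have hoj : order[j]'hjlen = keyOf line :=
          Option.some.inj ((List.getElem?_eq_getElem hjlen).symm.trans hjget)
        have h2 : ((c2i.get? (keyOf line)).getD 0 = (c : Int)) ↔
            keyOf line = order[c]'hclen := by
          rw [hget (keyOf line), hj]
          show ((j : Int) = (c : Int)) ↔ keyOf line = order[c]'hclen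
          rw [Nat.cast_inj]
          constructor
          · intro hjc; subst hjc; exact hoj.symm
          · intro hkc
            exact (List.Nodup.getElem_inj_iff hnd).mp (by rw [hoj, hkc])
        have hcond : ((PySem.List.pyIdx? n.toNat (sentOf line) = some r) ∧
              (c2i.get? (keyOf line)).getD 0 = (c : Int)) ↔
            ((PySem.List.pyIdx? n.toNat (sentOf line) = some r) ∧
              keyOf line = order[c]'hclen) := and_congr_right (fun _ => h2)
        rw [if_congr hcond rfl rfl]

-- ===== VERDICT (by name: the statement is the Claim_ definition above) =====
theorem create_entity_grid_spec : Claim_equal_create_entity_grid := by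
  intro doc_roles num_of_sents _ _
  unfold Spec_create_entity_grid create_entity_grid create_entity_grid_alt
  exact main_eq _ _
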